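-- pv_equiv track=rewrite | github.com/Itashka/deployment | Second_lab/MORE_TESTS.py | CountRepeat
-- ===== SOURCE A (Python) =====
-- def CountRepeat(string):
--     """
--     Возвращает количество символов, которые встречаются в строке более одного раза.
--     Регистр символов не учитывается.
--
--     >>> CountRepeat('asdazxcqweds')
--     3
--
--     >>> CountRepeat('aaaaassssddbbzzzqqqeer')
--     7
--     """
--     k = {}
--     for i in string:
--         if i in k:
--             k[i] += 1
--         else:
--             k[i] = 1
--
--     sum_keys = 0
--     for key, value in k.items():
--         if value > 1:
--             sum_keys = sum_keys + 1
--     return sum_keys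
-- ===== SOURCE B (Python) =====
-- def CountRepeat(string):
--     # Sort the characters so equal ones are adjacent, then count the runs
--     # of length >= 2 in one linear scan over the sorted sequence.
--     total = 0
--     prev = None
--     run = 0
--     for c in sorted(string):
--         if c == prev:
--             run += 1
--             if run == 2:
--                 total += 1
--         else:
--             prev = c
--             run = 1
--     return total
-- ===== Notes on version B (the rewrite author's own statement) =====
-- stated objective: alternative
-- what changed: Replaces the frequency dict plus a second scan over its items with sorting the characters and counting runs of length >= 2 in one linear scan over the sorted sequence.
import Mathlib
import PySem

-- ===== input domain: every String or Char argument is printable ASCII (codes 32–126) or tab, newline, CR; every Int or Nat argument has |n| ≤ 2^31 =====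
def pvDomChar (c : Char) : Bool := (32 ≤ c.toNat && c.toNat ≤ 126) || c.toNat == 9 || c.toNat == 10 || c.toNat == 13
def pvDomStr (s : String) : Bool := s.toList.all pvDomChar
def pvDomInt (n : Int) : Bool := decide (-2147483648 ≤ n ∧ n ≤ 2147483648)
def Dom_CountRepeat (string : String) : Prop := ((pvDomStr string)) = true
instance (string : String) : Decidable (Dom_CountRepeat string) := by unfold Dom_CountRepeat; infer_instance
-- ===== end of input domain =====

-- B sorts the characters and counts runs of length >= 2 in one scan, instead of A's frequency dict plus a second scan over its items; objective: alternative.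

-- ===== PORT A =====
-- A: build a count dict over the string, then scan its items counting values > 1.
def CountRepeat (string : String) : Int :=
  (string.toList.foldl
    (fun (k : PySem.Dict Char Int) i =>
      if k.contains i then k.modify i 0 (· + 1) else k.insert i 1)
    PySem.Dict.empty).items.foldl
    (fun sum_keys kv => if kv.2 > 1 then sum_keys + 1 else sum_keys) 0

-- ===== PORT B =====
-- B: sort, then one scan with state (total, prev, run), counting runs reaching length 2.
def CountRepeat_alt (string : String) : Int :=
  ((PySem.List.sorted string.toList (fun x => x) false).foldl
    (fun (st : Int × Option Char × Int) c =>
      if some c == st.2.1 then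
        (if st.2.2 + 1 == (2 : Int) then st.1 + 1 else st.1, st.2.1, st.2.2 + 1)
      else (st.1, some c, (1 : Int)))
    (0, none, 0)).1

-- ===== PRECONDITION & SPEC =====
def Spec_CountRepeat (string : String) (out : Int) : Prop := out = CountRepeat_alt string
instance (string : String) (out : Int) : Decidable (Spec_CountRepeat string out) := by unfold Spec_CountRepeat; infer_instance

-- ===== CLAIM (what is proved, stated in full; the proofs are below) =====
def Claim_equal_CountRepeat : Prop := ∀ (string : String), Dom_CountRepeat string → Spec_CountRepeat string (CountRepeat string)

-- ===== LEMMAS AND PROOFS =====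

-- B's loop body, named for the invariant (definitionally the lambda in CountRepeat_alt)
def pvStepB (st : Int × Option Char × Int) (c : Char) : Int × Option Char × Int :=
  if some c == st.2.1 then
    (if st.2.2 + 1 == (2 : Int) then st.1 + 1 else st.1, st.2.1, st.2.2 + 1)
  else (st.1, some c, (1 : Int))

theorem pvStepB_pos (st : Int × Option Char × Int) (c : Char)
    (h : (some c == st.2.1) = true) :
    pvStepB st c = (if st.2.2 + 1 == (2 : Int) then st.1 + 1 else st.1, st.2.1, st.2.2 + 1) := by
  unfold pvStepB; rw [if_pos h]

theorem pvStepB_neg (st : Int × Option Char × Int) (c : Char)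
    (h : (some c == st.2.1) = false) :
    pvStepB st c = (st.1, some c, (1 : Int)) := by
  unfold pvStepB; simp [h]

-- A's two branches are both k.modify i 0 (· + 1), so A's dict is Counter(string)
theorem pv_step_eq_modify (d : PySem.Dict Char Int) (i : Char) :
    (if d.contains i then d.modify i 0 (· + 1) else d.insert i 1) = d.modify i 0 (· + 1) := by
  by_cases h : d.contains i = true
  · simp [h]
  · have h' : d.contains i = false := by simpa using h
    simp [h', PySem.Dict.modify, PySem.Dict.getD_of_not_contains d (0 : Int) h']

-- in a ≤-sorted list the last element is maximal
theorem pv_le_last (l : List Char) (hp : l.Pairwise (· ≤ ·)) (x a : Char)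
    (hx : x ∈ l) (ha : l.getLast? = some a) : x ≤ a := by
  induction l with
  | nil => cases hx
  | cons b t ih =>
    cases t with
    | nil =>
      simp at hx ha; subst hx; subst ha; exact le_refl _
    | cons b' t' =>
      rw [List.getLast?_cons_cons] at ha
      rcases List.mem_cons.mp hx with hxb | hxt
      · subst hxb
        exact le_trans (List.rel_of_pairwise_cons hp (List.mem_of_getLast? ha))
          (le_refl a)
      · exact ih hp.of_cons hxt ha

-- invariant of B's scan over a ≤-sorted list: total counts the runs of length ≥ 2
-- (= distinct chars occurring ≥ 2 times), prev is the last element, run its count.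
theorem pv_invB (l : List Char) (hp : l.Pairwise (· ≤ ·)) :
    (l.foldl pvStepB (0, none, 0)).1
      = (((PySem.Set.ofList l).countP (fun x => decide (2 ≤ l.count x)) : Nat) : Int)
  ∧ (l.foldl pvStepB (0, none, 0)).2.1 = l.getLast?
  ∧ ∀ a, l.getLast? = some a → (l.foldl pvStepB (0, none, 0)).2.2 = (l.count a : Int) := by
  induction l using List.reverseRecOn with
  | nil => simp [PySem.Set.ofList]
  | append_singleton l c ih =>
    have hl : l.Pairwise (· ≤ ·) := hp.sublist (List.sublist_append_left _ _)
    have hle : ∀ x ∈ l, x ≤ c := by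
      intro x hx
      have := (List.pairwise_append.mp hp).2.2
      exact this x hx c (List.mem_singleton_self c)
    obtain ⟨h1, h2, h3⟩ := ih hl
    rw [List.foldl_append]
    simp only [List.foldl_cons, List.foldl_nil]
    cases hl0 : l with
    | nil =>
      subst hl0
      simp only [List.foldl_nil]
      rw [pvStepB_neg _ _ (by simp)]
      refine ⟨?_, ?_, ?_⟩
      · simp only [List.nil_append]
        show (0 : Int) = _
        have h1c : PySem.Set.ofList [c] = [c] := by
          simp [PySem.Set.ofList_eq_foldl, PySem.Set.add, PySem.Set.empty, PySem.Set.contains]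
        rw [h1c]
        simp [List.countP_cons]
      · rfl
      · intro a ha
        simp only [List.nil_append, List.getLast?_singleton, Option.some.injEq] at ha
        subst ha
        simp [List.count_singleton]
    | cons b t =>
      rw [← hl0]
      have hne : l ≠ [] := by simp [hl0]
      obtain ⟨a, ha⟩ := Option.isSome_iff_exists.mp (List.getLast?_isSome.mpr hne)
      have ham : a ∈ l := List.mem_of_getLast? ha
      have hmax : ∀ x ∈ l, x ≤ a := fun x hx => pv_le_last l hl x a hx ha
      have hrun := h3 a ha
      have hlast : (l ++ [c]).getLast? = some c := List.getLast?_concat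
      by_cases hca : c = a
      · -- c equals the last element: the run continues
        subst hca
        have hbeq : (some c == (l.foldl pvStepB (0, none, 0)).2.1) = true := by
          rw [h2, ha]; simp
        have hcl : c ∈ l := ham
        have hcount1 : (1 : Nat) ≤ l.count c := List.one_le_count_iff.mpr hcl
        rw [pvStepB_pos _ _ hbeq]
        refine ⟨?_, ?_, ?_⟩
        · dsimp only
          rw [h1]
          have hofl : PySem.Set.ofList (l ++ [c]) = PySem.Set.ofList l := by
            rw [PySem.Set.ofList_append_singleton,
                PySem.Set.add_of_mem (by rw [PySem.Set.mem_ofList]; exact hcl)]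
          rw [hofl]
          have hnd : (PySem.Set.ofList l).Nodup := PySem.Set.nodup_ofList l
          have hmemS : c ∈ PySem.Set.ofList l := by rw [PySem.Set.mem_ofList]; exact hcl
          have hsplit := (List.perm_cons_erase hmemS)
          rw [hsplit.countP_eq, hsplit.countP_eq]
          simp only [List.countP_cons]
          have hner : c ∉ (PySem.Set.ofList l).erase c := (hnd.mem_erase_iff ).mp.mt (by simp)
          have hco : ((PySem.Set.ofList l).erase c).countP (fun x => decide (2 ≤ (l ++ [c]).count x))
              = ((PySem.Set.ofList l).erase c).countP (fun x => decide (2 ≤ l.count x)) := by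
            refine List.countP_congr fun x hx => ?_
            have hxc : x ≠ c := fun h => hner (h ▸ hx)
            have hcx : ¬ c = x := fun h => hxc h.symm
            simp [List.count_append, List.count_singleton, hcx]
          rw [hco]
          by_cases h2c : l.count c = 1
          · have : ((l.foldl pvStepB (0, none, 0)).2.2 + 1 == (2 : Int)) = true := by
              rw [hrun, h2c]; simp
            rw [if_pos this]
            have hp1 : (decide (2 ≤ (l ++ [c]).count c)) = true := by
              simp [List.count_append, h2c]
            have hp2 : (decide (2 ≤ l.count c)) = false := by simp [h2c]
            simp only [hp1, hp2, if_true, if_false, Bool.false_eq_true]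
            push_cast
            ring
          · have hge2 : 2 ≤ l.count c := by omega
            have : ((l.foldl pvStepB (0, none, 0)).2.2 + 1 == (2 : Int)) = false := by
              rw [hrun]
              refine beq_eq_false_iff_ne.mpr fun h => ?_
              omega
            rw [if_neg (by simp [this])]
            have hp1 : (decide (2 ≤ (l ++ [c]).count c)) = true := by
              simp [List.count_append]; omega
            have hp2 : (decide (2 ≤ l.count c)) = true := by simpa using hge2
            simp only [hp1, hp2, if_true]
        · dsimp only
          rw [h2, ha, hlast]
        · intro a' ha'
          rw [hlast, Option.some.injEq] at ha'
          subst ha'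
          dsimp only
          rw [hrun]
          simp [List.count_append]
      · -- c is a new (strictly larger) character: a run of length 1 starts
        have hcl : c ∉ l := by
          intro hcin
          exact hca (le_antisymm (hmax c hcin) (hle a ham))
        have hbeq : (some c == (l.foldl pvStepB (0, none, 0)).2.1) = false := by
          rw [h2, ha]
          simp [hca]
        rw [pvStepB_neg _ _ hbeq]
        refine ⟨?_, ?_, ?_⟩
        · dsimp only
          rw [h1]
          have hofl : PySem.Set.ofList (l ++ [c]) = PySem.Set.ofList l ++ [c] := by
            rw [PySem.Set.ofList_append_singleton, PySem.Set.add]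
            rw [if_neg (by rw [PySem.Set.contains_iff, PySem.Set.mem_ofList]; simpa using hcl)]
          rw [hofl, List.countP_append]
          have hc0 : l.count c = 0 := List.count_eq_zero.mpr hcl
          have hpc : List.countP (fun x => decide (2 ≤ (l ++ [c]).count x)) [c] = 0 := by
            simp [List.countP_cons, List.count_append, hc0]
          rw [hpc]
          have hco : (PySem.Set.ofList l).countP (fun x => decide (2 ≤ (l ++ [c]).count x))
              = (PySem.Set.ofList l).countP (fun x => decide (2 ≤ l.count x)) := by
            refine List.countP_congr fun x hx => ?_
            have hxl : x ∈ l := (PySem.Set.mem_ofList l x).mp hx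
            have hxc : x ≠ c := fun h => hcl (h ▸ hxl)
            have hcx : ¬ c = x := fun h => hxc h.symm
            simp [List.count_append, List.count_singleton, hcx]
          rw [hco]
          simp
        · dsimp only
          rw [hlast]
        · intro a' ha'
          rw [hlast, Option.some.injEq] at ha'
          subst ha'
          dsimp only
          have : (l ++ [c]).count c = 1 := by
            simp [List.count_append, List.count_eq_zero.mpr hcl]
          rw [this]
          simp

-- ===== VERDICT (by name: the statement is the Claim_ definition above) =====
theorem CountRepeat_spec : Claim_equal_CountRepeat := by
  intro s _
  show CountRepeat s = CountRepeat_alt s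
  unfold CountRepeat CountRepeat_alt
  set l := s.toList with hl
  -- A's dict is Counter(l); its result is the number of distinct chars of l with count > 1
  have hstep : (fun (k : PySem.Dict Char Int) i =>
      if k.contains i then k.modify i 0 (· + 1) else k.insert i 1)
      = (fun (k : PySem.Dict Char Int) i => k.modify i 0 (· + 1)) := by
    funext d i; exact pv_step_eq_modify d i
  rw [hstep, ← PySem.Dict.counter_eq_foldl, PySem.Dict.items_counter]
  rw [show (fun (sum_keys : Int) (kv : Char × Int) => if kv.2 > 1 then sum_keys + 1 else sum_keys)
        = (fun (acc : Int) (kv : Char × Int) =>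
            if (fun kv : Char × Int => decide (kv.2 > 1)) kv = true then acc + 1 else acc) from by
      funext acc kv; by_cases h : kv.2 > 1 <;> simp [h]]
  rw [PySem.List.foldl_count_if (fun kv : Char × Int => decide (kv.2 > 1)), List.countP_map]
  -- B's scan over the sorted list counts the same distinct chars
  have hstep' : (fun (st : Int × Option Char × Int) c =>
      if some c == st.2.1 then
        (if st.2.2 + 1 == (2 : Int) then st.1 + 1 else st.1, st.2.1, st.2.2 + 1)
      else (st.1, some c, (1 : Int))) = pvStepB := rfl
  rw [hstep']
  set l' := PySem.List.sorted l (fun x => x) false with hl'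
  have hp : l'.Pairwise (· ≤ ·) := PySem.List.sorted_pairwise l (fun x => x)
  have hperm : l'.Perm l := PySem.List.sorted_perm l (fun x => x) false
  obtain ⟨h1, -, -⟩ := pv_invB l' hp
  rw [h1]
  have hcnt : (PySem.Set.ofList l').countP (fun x => decide (2 ≤ l'.count x))
      = (PySem.Set.ofList l').countP (fun x => decide (2 ≤ l.count x)) := by
    refine List.countP_congr fun x _ => ?_
    rw [hperm.count_eq]
  have hsetperm : (PySem.Set.ofList l').Perm (PySem.Set.ofList l) := by
    refine (List.perm_ext_iff_of_nodup (PySem.Set.nodup_ofList l') (PySem.Set.nodup_ofList l)).mpr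
      fun x => ?_
    rw [PySem.Set.mem_ofList, PySem.Set.mem_ofList, hperm.mem_iff]
  rw [hcnt, hsetperm.countP_eq]
  rw [zero_add]
  congr 1
  refine List.countP_congr fun k _ => ?_
  simp only [Function.comp_apply, decide_eq_true_eq]
  omega
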